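-- pv_equiv track=rewrite | github.com/msrosenberg/ImpactFactor | Impact_Funcs.py | calculate_woeginger_w
-- ===== SOURCE A (Python) =====
-- def calculate_woeginger_w(citations: list, rank_order: list) -> int:
--     w = 0
--     for j in range(len(citations)):
--         tmp_good = True
--         for i in range(len(rank_order)):
--             if rank_order[i] <= j:
--                 if citations[i] < j - rank_order[i] + 1:
--                     tmp_good = False
--         if tmp_good:
--             w = j
--     return w
-- ===== SOURCE B (Python) =====
-- def calculate_woeginger_w(citations: list, rank_order: list) -> int:
--     # Closed form: j is "good" iff j < max(r, c + r) for every pair; goodness is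
--     # downward-closed, so the answer is the largest good j in [0, n-1], or 0.
--     n = len(citations)
--     if n == 0:
--         return 0
--     m = min((max(r, c + r) for c, r in zip(citations, rank_order)), default=n)
--     return max(0, min(n - 1, m - 1))
-- ===== Notes on version B (the rewrite author's own statement) =====
-- stated objective: faster
-- what changed: B replaces A's nested rank-condition scan by a single pass: rank j is good iff j < max(r, c+r) for every (citation, rank) pair, a downward-closed condition, so the answer is the minimum of these bounds clamped into [0, n-1].
import Mathlib
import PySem

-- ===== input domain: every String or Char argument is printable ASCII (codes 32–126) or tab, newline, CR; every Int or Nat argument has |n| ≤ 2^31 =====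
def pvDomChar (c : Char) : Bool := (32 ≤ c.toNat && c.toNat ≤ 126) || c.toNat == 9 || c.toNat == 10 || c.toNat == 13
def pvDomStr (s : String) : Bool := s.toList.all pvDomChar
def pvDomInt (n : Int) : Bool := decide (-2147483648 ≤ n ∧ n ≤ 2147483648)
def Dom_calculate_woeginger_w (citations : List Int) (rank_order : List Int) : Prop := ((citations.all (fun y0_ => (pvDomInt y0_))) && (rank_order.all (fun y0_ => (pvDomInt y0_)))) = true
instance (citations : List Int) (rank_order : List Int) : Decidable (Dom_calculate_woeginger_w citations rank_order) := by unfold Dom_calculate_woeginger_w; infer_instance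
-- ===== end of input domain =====

-- B replaces A's quadratic double loop by a linear closed form (rank j is good iff
-- j < max(r, c+r) for every pair, a downward-closed condition, so the answer is a
-- clamped minimum); proved equal to A on all inputs where A returns.

-- ===== PORT A =====
-- Literal port of A. In Python, `citations[i]` raises IndexError when rank_order is
-- the longer list and a trailing rank entry fires the `rank_order[i] <= j` branch;
-- exactly those inputs are excluded by Pre_ below, so the pyGetD default 0 for
-- citations is never consulted on admitted inputs.
def calculate_woeginger_w (citations : List Int) (rank_order : List Int) : Int :=
  (PySem.List.pyRange 0 (PySem.List.len citations)).foldl (fun w j =>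
    let tmp_good :=
      (PySem.List.pyRange 0 (PySem.List.len rank_order)).foldl (fun g i =>
        if PySem.List.pyGetD rank_order i 0 ≤ j then
          if PySem.List.pyGetD citations i 0 < j - PySem.List.pyGetD rank_order i 0 + 1 then false
          else g
        else g) true
    if tmp_good then j else w) 0

-- ===== PORT B =====
def calculate_woeginger_w_alt (citations : List Int) (rank_order : List Int) : Int :=
  if PySem.List.len citations = 0 then 0
  else
    max 0 (min (PySem.List.len citations - 1)
      (PySem.List.minD ((citations.zip rank_order).map (fun p => max p.2 (p.1 + p.2)))
        (fun y => y) (PySem.List.len citations) - 1))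

-- ===== PRECONDITION & SPEC =====
-- Pre_ excludes exactly the inputs on which Python A raises IndexError: rank_order
-- longer than citations with some trailing rank entry below len(citations).
def Pre_calculate_woeginger_w (citations : List Int) (rank_order : List Int) : Prop :=
  citations = [] ∨ ∀ x ∈ rank_order.drop citations.length, (citations.length : Int) ≤ x
instance (citations : List Int) (rank_order : List Int) : Decidable (Pre_calculate_woeginger_w citations rank_order) := by unfold Pre_calculate_woeginger_w; infer_instance

def pvWitness_calculate_woeginger_w : List Int × List Int := ([3, 1], [1, 2])

def Spec_calculate_woeginger_w (citations : List Int) (rank_order : List Int) (out : Int) : Prop := out = calculate_woeginger_w_alt citations rank_order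
instance (citations : List Int) (rank_order : List Int) (out : Int) : Decidable (Spec_calculate_woeginger_w citations rank_order out) := by unfold Spec_calculate_woeginger_w; infer_instance

-- ===== CLAIM (what is proved, stated in full; the proofs are below) =====
def Claim_equal_calculate_woeginger_w : Prop := ∀ (citations : List Int) (rank_order : List Int), Dom_calculate_woeginger_w citations rank_order → Pre_calculate_woeginger_w citations rank_order → Spec_calculate_woeginger_w citations rank_order (calculate_woeginger_w citations rank_order)

-- ===== LEMMAS AND PROOFS =====

-- A's inner loop restricted to the first (zip citations rank_order).length indices is
-- the "some pair already kills rank j" test.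
theorem wog_inner_prefix (citations rank_order : List Int) (j : Int) (g : Bool) :
    (PySem.List.pyRange 0 (PySem.List.len (citations.zip rank_order))).foldl (fun g i =>
        if PySem.List.pyGetD rank_order i 0 ≤ j then
          if PySem.List.pyGetD citations i 0 < j - PySem.List.pyGetD rank_order i 0 + 1 then false
          else g
        else g) g
    = (g && !(citations.zip rank_order).any (fun p => decide (max p.2 (p.1 + p.2) ≤ j))) := by
  have hstep : (PySem.List.pyRange 0 (PySem.List.len (citations.zip rank_order))).foldl (fun g i =>
        if PySem.List.pyGetD rank_order i 0 ≤ j then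
          if PySem.List.pyGetD citations i 0 < j - PySem.List.pyGetD rank_order i 0 + 1 then false
          else g
        else g) g
      = (PySem.List.pyRange 0 (PySem.List.len (citations.zip rank_order))).foldl (fun g i =>
          (fun (acc : Bool) (p : Int × Int) => if (decide (max p.2 (p.1 + p.2) ≤ j)) = true then false else acc) g
            (PySem.List.pyGetD (citations.zip rank_order) i (0, 0))) g := by
    refine PySem.List.foldl_congr_mem _ _ _ _ ?_
    intro acc i hi
    rw [PySem.List.mem_pyRange_one] at hi
    simp only [PySem.List.len_eq] at hi
    have h1 : i < ((citations.zip rank_order).length : Int) := hi.2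
    have h1' : i.toNat < (citations.zip rank_order).length := by omega
    have hlz : (citations.zip rank_order).length = min citations.length rank_order.length :=
      List.length_zip
    rw [PySem.List.pyGetD_eq_getElem (citations.zip rank_order) (0, 0) hi.1 h1,
        PySem.List.pyGetD_eq_getElem rank_order 0 hi.1 (by omega),
        PySem.List.pyGetD_eq_getElem citations 0 hi.1 (by omega),
        List.getElem_zip]
    simp only [decide_eq_true_eq]
    split_ifs <;> first | rfl | omega
  rw [hstep, PySem.List.foldl_pyRange_zero_pyGetD (citations.zip rank_order) ((0 : Int), (0 : Int))
      (fun (acc : Bool) (p : Int × Int) => if (decide (max p.2 (p.1 + p.2) ≤ j)) = true then false else acc) g,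
    PySem.List.foldl_if_false_eq]

-- A's full inner loop (over all of rank_order): on admitted inputs the trailing
-- indices (when rank_order is longer) never fire, so the prefix value stands.
theorem wog_inner_full (citations rank_order : List Int) (j : Int)
    (hpre : ∀ x ∈ rank_order.drop citations.length, (citations.length : Int) ≤ x)
    (hj : j < (citations.length : Int)) :
    (PySem.List.pyRange 0 (PySem.List.len rank_order)).foldl (fun g i =>
        if PySem.List.pyGetD rank_order i 0 ≤ j then
          if PySem.List.pyGetD citations i 0 < j - PySem.List.pyGetD rank_order i 0 + 1 then false
          else g
        else g) true
    = !(citations.zip rank_order).any (fun p => decide (max p.2 (p.1 + p.2) ≤ j)) := by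
  by_cases hlen : rank_order.length ≤ citations.length
  · have hlz : (citations.zip rank_order).length = rank_order.length := by
      rw [List.length_zip]; omega
    have hrw : (PySem.List.len rank_order) = PySem.List.len (citations.zip rank_order) := by
      simp only [PySem.List.len_eq, hlz]
    rw [hrw, wog_inner_prefix, Bool.true_and]
  · have hlz : (citations.zip rank_order).length = citations.length := by
      rw [List.length_zip]; omega
    have hsplit : PySem.List.pyRange 0 (PySem.List.len rank_order)
        = PySem.List.pyRange 0 (PySem.List.len (citations.zip rank_order))
          ++ PySem.List.pyRange (PySem.List.len (citations.zip rank_order)) (PySem.List.len rank_order) := by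
      refine PySem.List.pyRange_one_append _ _ _ (by simp [PySem.List.len_eq]) ?_
      simp only [PySem.List.len_eq, hlz]
      omega
    rw [hsplit, List.foldl_append, wog_inner_prefix, Bool.true_and]
    have htail : (PySem.List.pyRange (PySem.List.len (citations.zip rank_order)) (PySem.List.len rank_order)).foldl (fun g i =>
        if PySem.List.pyGetD rank_order i 0 ≤ j then
          if PySem.List.pyGetD citations i 0 < j - PySem.List.pyGetD rank_order i 0 + 1 then false
          else g
        else g) (!(citations.zip rank_order).any (fun p => decide (max p.2 (p.1 + p.2) ≤ j)))
        = (!(citations.zip rank_order).any (fun p => decide (max p.2 (p.1 + p.2) ≤ j))) := by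
      rw [PySem.List.foldl_congr_mem _ _ (fun g _ => g) _ ?_, PySem.List.foldl_ignore]
      intro acc i hi
      rw [PySem.List.mem_pyRange_one] at hi
      simp only [PySem.List.len_eq, hlz] at hi
      have h0 : (0 : Int) ≤ i := le_trans (by exact_mod_cast Int.natCast_nonneg citations.length) hi.1
      have h1 : i.toNat < rank_order.length := by omega
      have hcl : citations.length ≤ i.toNat := by omega
      rw [PySem.List.pyGetD_eq_getElem rank_order 0 h0 (by omega)]
      have hmem : rank_order[i.toNat] ∈ rank_order.drop citations.length := by
        have : rank_order[i.toNat] = (rank_order.drop citations.length)[i.toNat - citations.length]'(by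
            rw [List.length_drop]; omega) := by
          rw [List.getElem_drop]
          congr 1
          omega
        rw [this]
        exact List.getElem_mem _
      have hge := hpre _ hmem
      rw [if_neg (by omega)]
    rw [htail]

-- The outer loop with a monotone "good" test `j < m` in closed form.
theorem wog_outer (m : Int) (n : Nat) (hn : 0 < n) :
    (PySem.List.pyRange 0 (n : Int)).foldl (fun w j => if j < m then j else w) 0
    = max 0 (min ((n : Int) - 1) (m - 1)) := by
  induction n with
  | zero => omega
  | succ k ih =>
    by_cases hk : k = 0
    · subst hk
      rw [show ((1 : Nat) : Int) = 0 + 1 by omega, PySem.List.pyRange_one_singleton]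
      simp only [List.foldl]
      split_ifs <;> omega
    · have hk' : 0 < k := Nat.pos_of_ne_zero hk
      rw [show ((k + 1 : Nat) : Int) = (k : Int) + 1 by push_cast; ring,
          PySem.List.pyRange_one_succ_right (by omega : (0 : Int) ≤ (k : Int)),
          List.foldl_append, ih hk']
      simp only [List.foldl]
      split_ifs <;> omega

-- ===== VERDICT (by name: the statement is the Claim_ definition above) =====
theorem calculate_woeginger_w_spec : Claim_equal_calculate_woeginger_w := by
  intro citations rank_order hdom hpre
  unfold Spec_calculate_woeginger_w
  by_cases hnil : citations = []
  · subst hnil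
    simp [calculate_woeginger_w, calculate_woeginger_w_alt, PySem.List.len_eq,
      PySem.List.pyRange_one_eq_nil]
  · have hN : 0 < citations.length := List.length_pos_iff.mpr hnil
    have hpre' : ∀ x ∈ rank_order.drop citations.length, (citations.length : Int) ≤ x := by
      rcases hpre with h | h
      · exact absurd h hnil
      · exact h
    unfold calculate_woeginger_w calculate_woeginger_w_alt
    have houter : ∀ (acc : Int), ∀ j ∈ PySem.List.pyRange 0 (PySem.List.len citations),
        (fun (w j : Int) =>
          let tmp_good :=
            (PySem.List.pyRange 0 (PySem.List.len rank_order)).foldl (fun g i =>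
              if PySem.List.pyGetD rank_order i 0 ≤ j then
                if PySem.List.pyGetD citations i 0 < j - PySem.List.pyGetD rank_order i 0 + 1 then false
                else g
              else g) true
          if tmp_good then j else w) acc j
        = (fun (w j : Int) =>
            if (!(citations.zip rank_order).any (fun p => decide (max p.2 (p.1 + p.2) ≤ j))) then j
            else w) acc j := by
      intro acc j hjmem
      rw [PySem.List.mem_pyRange_one] at hjmem
      simp only [PySem.List.len_eq] at hjmem
      show (if ((PySem.List.pyRange 0 (PySem.List.len rank_order)).foldl (fun g i =>
              if PySem.List.pyGetD rank_order i 0 ≤ j then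
                if PySem.List.pyGetD citations i 0 < j - PySem.List.pyGetD rank_order i 0 + 1 then false
                else g
              else g) true) then j else acc) = _
      rw [wog_inner_full citations rank_order j hpre' hjmem.2]
    rw [PySem.List.foldl_congr_mem _ _ _ 0 houter]
    rcases hzs : citations.zip rank_order with _ | ⟨p, t⟩
    · -- no pairs at all: every rank j is good
      have hall : ∀ (acc : Int), ∀ j ∈ PySem.List.pyRange 0 (PySem.List.len citations),
          (fun (w j : Int) =>
            if (!([] : List (Int × Int)).any (fun p => decide (max p.2 (p.1 + p.2) ≤ j))) then j
            else w) acc j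
          = (fun (w j : Int) => if j < (citations.length : Int) then j else w) acc j := by
        intro acc j hjmem
        rw [PySem.List.mem_pyRange_one] at hjmem
        simp only [PySem.List.len_eq] at hjmem
        simp [hjmem.2]
      rw [PySem.List.foldl_congr_mem _ _ _ 0 hall]
      simp only [PySem.List.len_eq, List.map_nil]
      rw [wog_outer _ _ hN, if_neg (by omega)]
      have hminD : PySem.List.minD ([] : List Int) (fun y => y) ((citations.length : Int))
          = (citations.length : Int) := by
        simp [PySem.List.minD, PySem.List.min?]
      rw [hminD]
    · -- at least one pair: the minimum of max(r, c+r) decides goodness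
      have hle := PySem.List.foldl_min_le (t.map (fun p : Int × Int => max p.2 (p.1 + p.2)))
        (max p.2 (p.1 + p.2))
      have hmem := PySem.List.foldl_min_mem (t.map (fun p : Int × Int => max p.2 (p.1 + p.2)))
        (max p.2 (p.1 + p.2))
      set mB := (t.map (fun p : Int × Int => max p.2 (p.1 + p.2))).foldl min (max p.2 (p.1 + p.2)) with hmB
      have hcond : ∀ j : Int,
          ((!(p :: t).any (fun q => decide (max q.2 (q.1 + q.2) ≤ j))) = true) ↔ j < mB := by
        intro j
        simp only [Bool.not_eq_eq_eq_not, Bool.not_true, List.any_eq_false, decide_eq_true_eq]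
        constructor
        · intro h
          rcases hmem with h' | h'
          · have := h p (List.mem_cons_self ..)
            omega
          · rcases List.mem_map.mp h' with ⟨q, hq, hq'⟩
            have hq2 : max q.2 (q.1 + q.2) = mB := hq'
            have := h q (List.mem_cons_of_mem _ hq)
            omega
        · intro h q hq
          rcases List.mem_cons.mp hq with rfl | hq'
          · have := hle.1; omega
          · have h2 : mB ≤ max q.2 (q.1 + q.2) :=
              hle.2 _ (List.mem_map_of_mem (f := fun p : Int × Int => max p.2 (p.1 + p.2)) hq')
            omega
      have hgood : ∀ (acc : Int), ∀ j ∈ PySem.List.pyRange 0 (PySem.List.len citations),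
          (fun (w j : Int) =>
            if (!(p :: t).any (fun p => decide (max p.2 (p.1 + p.2) ≤ j))) then j else w) acc j
          = (fun (w j : Int) => if j < mB then j else w) acc j := by
        intro acc j _
        by_cases hj : j < mB
        · simp only
          rw [if_pos ((hcond j).mpr hj), if_pos hj]
        · simp only
          rw [if_neg (fun hc => hj ((hcond j).mp hc)), if_neg hj]
      rw [PySem.List.foldl_congr_mem _ _ _ 0 hgood]
      simp only [PySem.List.len_eq, List.map_cons]
      rw [wog_outer _ _ hN, if_neg (by omega)]
      have hminD : PySem.List.minD
          (max p.2 (p.1 + p.2) :: t.map (fun p : Int × Int => max p.2 (p.1 + p.2)))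
          (fun y => y) ((citations.length : Int)) = mB := by
        simp [PySem.List.minD, PySem.List.min?_id_cons, hmB]
      rw [hminD]
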